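-- pv_equiv track=rewrite | github.com/MayankDubey007/300_CodingQuestions | codding questions/String/15)Replace_in_first_occurence_of _vowel_with_-.py | frt_vowel_rpl
-- ===== SOURCE A (Python) =====
-- def frt_vowel_rpl(st):
--     st1=''
--     flag=0
--     for i in st:
--         if i in '''aeiuoAEUOI''' and flag<1:
--             st1+="-"
--             flag+=1
--         else:
--             st1+=i
--     return(st1)
-- ===== SOURCE B (Python) =====
-- def frt_vowel_rpl(st):
--     idx = next((i for i, c in enumerate(st) if c in 'aeiuoAEUOI'), None)
--     if idx is None:
--         return st
--     return st[:idx] + '-' + st[idx+1:]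
-- ===== Notes on version B (the rewrite author's own statement) =====
-- stated objective: idiomatic
-- what changed: Replaced the accumulate-with-flag character loop by locate-then-splice: find the index of the first vowel with next/enumerate, then return the string unchanged or rebuilt by three slices; this also avoids A's repeated string concatenation.
import Mathlib
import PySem

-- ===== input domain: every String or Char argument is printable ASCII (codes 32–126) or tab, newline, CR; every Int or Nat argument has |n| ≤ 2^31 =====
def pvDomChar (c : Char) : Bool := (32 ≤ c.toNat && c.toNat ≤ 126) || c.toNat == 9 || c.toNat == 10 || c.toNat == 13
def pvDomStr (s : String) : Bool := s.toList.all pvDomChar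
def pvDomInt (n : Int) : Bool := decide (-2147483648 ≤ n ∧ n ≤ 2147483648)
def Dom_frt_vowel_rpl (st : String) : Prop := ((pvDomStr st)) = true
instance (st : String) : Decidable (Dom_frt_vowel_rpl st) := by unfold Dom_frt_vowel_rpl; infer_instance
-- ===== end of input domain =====

-- B replaces A's accumulate-with-flag loop by locate-then-splice (find first vowel index, then slice); idiomatic, same cost.

-- the vowel string 'aeiuoAEUOI' both Pythons test membership in
def pvVowels : List Char := ['a', 'e', 'i', 'u', 'o', 'A', 'E', 'U', 'O', 'I']

-- ===== PORT A =====
-- one loop step of A: append '-' and raise the flag on the first vowel, else append the char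
def frtStepA (p : List Char × Nat) (i : Char) : List Char × Nat :=
  if i ∈ pvVowels ∧ p.2 < 1 then (p.1 ++ ['-'], p.2 + 1) else (p.1 ++ [i], p.2)

def frt_vowel_rpl (st : String) : String :=
  let r := st.toList.foldl frtStepA ([], 0)
  String.ofList r.1

-- ===== PORT B =====
def frt_vowel_rpl_alt (st : String) : String :=
  let cs := st.toList
  match cs.findIdx? (fun c => c ∈ pvVowels) with
  | none => st
  | some idx => String.ofList (cs.take idx ++ ['-'] ++ cs.drop (idx + 1))

-- ===== PRECONDITION & SPEC =====
def Spec_frt_vowel_rpl (st : String) (out : String) : Prop := out = frt_vowel_rpl_alt st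
instance (st : String) (out : String) : Decidable (Spec_frt_vowel_rpl st out) := by unfold Spec_frt_vowel_rpl; infer_instance

-- ===== CLAIM (what is proved, stated in full; the proofs are below) =====
def Claim_equal_frt_vowel_rpl : Prop := ∀ (st : String), Dom_frt_vowel_rpl st → Spec_frt_vowel_rpl st (frt_vowel_rpl st)

-- ===== LEMMAS AND PROOFS =====

-- once the flag is set, A's loop just appends the remaining characters
theorem frt_foldA_done (cs : List Char) (acc : List Char) (f : Nat) (hf : 1 ≤ f) :
    (cs.foldl frtStepA (acc, f)).1 = acc ++ cs := by
  induction cs generalizing acc with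
  | nil => simp
  | cons c cs ih =>
      simp only [List.foldl_cons, frtStepA]
      rw [if_neg (fun h => by omega)]
      simpa using ih (acc ++ [c])
  
-- with flag 0, A's loop produces exactly B's locate-then-splice result (prefixed by acc)
theorem frt_foldA_zero (cs : List Char) (acc : List Char) :
    (cs.foldl frtStepA (acc, 0)).1 =
      acc ++ (match cs.findIdx? (fun c => c ∈ pvVowels) with
              | none => cs
              | some idx => cs.take idx ++ ['-'] ++ cs.drop (idx + 1)) := by
  induction cs generalizing acc with
  | nil => simp
  | cons c cs ih =>
      by_cases hv : c ∈ pvVowels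
      · simp only [List.foldl_cons, frtStepA,
          if_pos (show c ∈ pvVowels ∧ 0 < 1 from ⟨hv, Nat.zero_lt_one⟩)]
        rw [frt_foldA_done cs (acc ++ ['-']) 1 le_rfl]
        simp [List.findIdx?_cons, hv]
      · simp only [List.foldl_cons, frtStepA]
        rw [if_neg (by simp [hv])]
        rw [ih (acc ++ [c])]
        simp only [List.findIdx?_cons, hv, decide_eq_true_eq]
        cases h : cs.findIdx? (fun c => decide (c ∈ pvVowels)) <;> simp

-- ===== VERDICT (by name: the statement is the Claim_ definition above) =====
theorem frt_vowel_rpl_spec : Claim_equal_frt_vowel_rpl := by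
  intro st _
  unfold Spec_frt_vowel_rpl frt_vowel_rpl frt_vowel_rpl_alt
  simp only
  rw [frt_foldA_zero st.toList []]
  cases h : st.toList.findIdx? (fun c => c ∈ pvVowels) <;> simp
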